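-- pv_equiv track=rewrite | github.com/Priscillepy/PythonExam | Problem4_Priscille.py | divide_array_into_sub_arrays
-- ===== SOURCE A (Python) =====
-- def divide_array_into_sub_arrays(array):
--     count = 0
--     for i in range(len(array)):
--         count+= array[i]
--         for j in range(1, len(array)):
--             sum = array[i] + array[j]
--             if sum == count//2:
--                 return f" Sub-arrays are [ {array[i]}, {array[j]} ]"
-- ===== SOURCE B (Python) =====
-- def divide_array_into_sub_arrays(array):
--     # Inverted search: instead of scanning the tail for a partner of each prefix
--     # position, build once a map from each position's needed partner value
--     # (count//2 - x) to the earliest position producing it, then make a single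
--     # pass over the tail values keeping the smallest mapped position found.
--     n = len(array)
--     first_at = {}
--     count = 0
--     i = 0
--     for x in array:
--         count += x
--         t = count // 2 - x
--         if t not in first_at:
--             first_at[t] = i
--         i += 1
--     best = n
--     partner = 0
--     for y in array[1:]:
--         k = first_at.get(y, n)
--         if k < best:
--             best = k
--             partner = y
--     if best < n:
--         return f" Sub-arrays are [ {array[best]}, {partner} ]"
-- ===== Notes on version B (the rewrite author's own statement) =====
-- stated objective: alternative
-- what changed: Inverts A's nested search: one pass builds a dict mapping each position's needed partner value (prefix//2 - x) to the earliest such position, then a single pass over the tail values keeps the smallest mapped position; the nested scan disappears and the early-return loop becomes a staged min-reduction.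
import Mathlib
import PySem

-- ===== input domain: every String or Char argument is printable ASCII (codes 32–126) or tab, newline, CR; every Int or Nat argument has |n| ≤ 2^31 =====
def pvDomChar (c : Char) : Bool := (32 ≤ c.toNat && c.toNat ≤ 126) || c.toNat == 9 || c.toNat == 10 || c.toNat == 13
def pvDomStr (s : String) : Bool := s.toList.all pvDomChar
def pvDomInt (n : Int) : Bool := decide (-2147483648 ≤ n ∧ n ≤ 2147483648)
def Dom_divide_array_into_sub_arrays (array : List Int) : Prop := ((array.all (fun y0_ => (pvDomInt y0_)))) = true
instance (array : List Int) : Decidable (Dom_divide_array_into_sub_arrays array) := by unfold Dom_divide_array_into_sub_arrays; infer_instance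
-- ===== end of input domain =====

-- B inverts A's search: one pass builds a dict from each position's needed partner value
-- (count//2 - array[i]) to the earliest such position, then one pass over the tail values
-- keeps the smallest mapped position; no nested scan (objective: alternative).

-- ===== PORT A =====
-- inner loop: for j in range(1, len(array)): if array[i]+array[j] == count//2: return …
def pvInnerA (array : List Int) (ai count : Int) : List Int → Option String
  | [] => none
  | j :: js =>
    match PySem.List.pyGet? array j with
    | none => none   -- IndexError (unreachable: j ∈ range(1, len(array)))
    | some aj =>
      if ai + aj = PySem.Int.floordiv count 2 then
        some (" Sub-arrays are [ " ++ PySem.Int.toStr ai ++ ", " ++ PySem.Int.toStr aj ++ " ]")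
      else pvInnerA array ai count js

-- outer loop: for i in range(len(array)): count += array[i]; <inner loop>
def pvOuterA (array : List Int) : Int → List Int → Option String
  | _, [] => none
  | count, i :: is =>
    match PySem.List.pyGet? array i with
    | none => none   -- IndexError (unreachable: i ∈ range(len(array)))
    | some ai =>
      match pvInnerA array ai (count + ai) (PySem.List.pyRange 1 (array.length : Int) 1) with
      | some s => some s
      | none => pvOuterA array (count + ai) is

def divide_array_into_sub_arrays (array : List Int) : Option String :=
  pvOuterA array 0 (PySem.List.pyRange 0 (array.length : Int) 1)

-- ===== PORT B =====
-- stage 1: for x in array: count += x; t = count//2 - x; if t not in first_at: first_at[t] = i; i += 1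
def pvStage1B (d : PySem.Dict Int Nat) (count : Int) (i : Nat) : List Int → PySem.Dict Int Nat
  | [] => d
  | x :: xs =>
    pvStage1B
      (if PySem.Dict.contains d (PySem.Int.floordiv (count + x) 2 - x) then d
       else PySem.Dict.insert d (PySem.Int.floordiv (count + x) 2 - x) i)
      (count + x) (i + 1) xs

-- stage 2: for y in array[1:]: k = first_at.get(y, n); if k < best: best = k; partner = y
def pvStage2B (d : PySem.Dict Int Nat) (n : Nat) : Nat → Int → List Int → Nat × Int
  | best, partner, [] => (best, partner)
  | best, partner, y :: ys =>
    if PySem.Dict.getD d y n < best then pvStage2B d n (PySem.Dict.getD d y n) y ys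
    else pvStage2B d n best partner ys

def divide_array_into_sub_arrays_alt (array : List Int) : Option String :=
  let n := array.length
  let d := pvStage1B PySem.Dict.empty 0 0 array
  let bp := pvStage2B d n n 0 (PySem.List.slice array (some 1) none)
  if bp.1 < n then
    match PySem.List.pyGet? array (bp.1 : Int) with   -- array[best]; bp.1 < n so in range
    | some v => some (" Sub-arrays are [ " ++ PySem.Int.toStr v ++ ", " ++ PySem.Int.toStr bp.2 ++ " ]")
    | none => none
  else none

-- ===== PRECONDITION & SPEC =====
def Spec_divide_array_into_sub_arrays (array : List Int) (out : Option String) : Prop := out = divide_array_into_sub_arrays_alt array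
instance (array : List Int) (out : Option String) : Decidable (Spec_divide_array_into_sub_arrays array out) := by unfold Spec_divide_array_into_sub_arrays; infer_instance

-- ===== CLAIM =====
def Claim_equal_divide_array_into_sub_arrays : Prop := ∀ (array : List Int), Dom_divide_array_into_sub_arrays array → Spec_divide_array_into_sub_arrays array (divide_array_into_sub_arrays array)

-- ===== LEMMAS AND PROOFS =====

-- the list of partner values A searches for: ts[k] = (prefix-sum through k)//2 - array[k]
def pvTs (count : Int) : List Int → List Int
  | [] => []
  | x :: xs => (PySem.Int.floordiv (count + x) 2 - x) :: pvTs (count + x) xs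

theorem pvTs_length (count : Int) (xs : List Int) : (pvTs count xs).length = xs.length := by
  induction xs generalizing count with
  | nil => rfl
  | cons x xs ih => simp [pvTs, ih]

-- the common specification: the first position whose partner value occurs in the tail
def pvHit (tail : List Int) : Int → List Int → Option (Int × Int)
  | _, [] => none
  | count, x :: xs =>
    if (PySem.Int.floordiv (count + x) 2 - x) ∈ tail
    then some (x, PySem.Int.floordiv (count + x) 2 - x)
    else pvHit tail (count + x) xs

-- A's inner scan over range(1, len) returns iff the partner value fd - ai (fd = count//2)
-- occurs in array[k:]; the returned string depends only on ai and fd - ai.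
theorem pvInnerA_eq (array : List Int) (ai count : Int) (k : Nat) :
    pvInnerA array ai count (PySem.List.pyRange (k : Int) (array.length : Int) 1) =
      (if PySem.Int.floordiv count 2 - ai ∈ array.drop k then
        some (" Sub-arrays are [ " ++ PySem.Int.toStr ai ++ ", "
              ++ PySem.Int.toStr (PySem.Int.floordiv count 2 - ai) ++ " ]")
      else none) := by
  by_cases h : k < array.length
  · rw [PySem.List.pyRange_one_cons (by exact_mod_cast h), List.drop_eq_getElem_cons h,
        (by push_cast; ring : ((k : Int) + 1) = ((k + 1 : Nat) : Int))]
    have ih := pvInnerA_eq array ai count (k + 1)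
    simp only [pvInnerA, PySem.List.pyGet?_natCast, List.getElem?_eq_getElem h, ih, List.mem_cons]
    set fd := PySem.Int.floordiv count 2 with hfd
    by_cases hx : array[k] = fd - ai
    · rw [if_pos (show ai + array[k] = fd by omega), if_pos (Or.inl hx.symm), hx]
    · rw [if_neg (show ¬ ai + array[k] = fd by omega)]
      by_cases hm : fd - ai ∈ array.drop (k + 1)
      · rw [if_pos hm, if_pos (Or.inr hm)]
      · rw [if_neg hm, if_neg (by rintro (h1 | h2); exact hx h1.symm; exact hm h2)]
  · rw [PySem.List.pyRange_one_eq_nil (by exact_mod_cast Nat.le_of_not_lt h),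
        List.drop_of_length_le (Nat.le_of_not_lt h)]
    simp [pvInnerA]
termination_by array.length - k
decreasing_by omega

-- A's outer loop from index k is the first-hit search over array[k:]
theorem pvOuterA_eq (array : List Int) (count : Int) (k : Nat) :
    pvOuterA array count (PySem.List.pyRange (k : Int) (array.length : Int) 1) =
      (pvHit (array.drop 1) count (array.drop k)).map
        (fun p => " Sub-arrays are [ " ++ PySem.Int.toStr p.1 ++ ", " ++ PySem.Int.toStr p.2 ++ " ]") := by
  by_cases h : k < array.length
  · rw [PySem.List.pyRange_one_cons (by exact_mod_cast h), List.drop_eq_getElem_cons h,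
        (by push_cast; ring : ((k : Int) + 1) = ((k + 1 : Nat) : Int))]
    have ih := pvOuterA_eq array (count + array[k]) (k + 1)
    have hin := pvInnerA_eq array array[k] (count + array[k]) 1
    rw [Nat.cast_one] at hin
    simp only [pvOuterA, PySem.List.pyGet?_natCast, List.getElem?_eq_getElem h, hin, ih, pvHit]
    by_cases hm : PySem.Int.floordiv (count + array[k]) 2 - array[k] ∈ List.drop 1 array
    · simp_all [List.drop_one]
    · simp_all [List.drop_one]
  · rw [PySem.List.pyRange_one_eq_nil (by exact_mod_cast Nat.le_of_not_lt h),
        List.drop_of_length_le (Nat.le_of_not_lt h)]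
    simp [pvOuterA, pvHit]
termination_by array.length - k
decreasing_by omega

-- first-hit characterizations
theorem pvHit_eq_some (tail : List Int) (count : Int) (xs : List Int) (x t : Int)
    (h : pvHit tail count xs = some (x, t)) :
    ∃ k, ∃ hk : k < xs.length, xs[k] = x ∧ (pvTs count xs)[k]'(by rw [pvTs_length]; exact hk) = t ∧
      t ∈ tail ∧ ∀ j (hj : j < k), (pvTs count xs)[j]'(by rw [pvTs_length]; omega) ∉ tail := by
  induction xs generalizing count with
  | nil => simp [pvHit] at h
  | cons a as ih =>
    simp only [pvHit] at h
    by_cases hm : (PySem.Int.floordiv (count + a) 2 - a) ∈ tail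
    · rw [if_pos hm] at h
      simp only [Option.some.injEq, Prod.mk.injEq] at h
      exact ⟨0, by simp, by simp [h.1], by simpa [pvTs] using h.2, h.2 ▸ hm,
        by intro j hj; exact absurd hj (by omega)⟩
    · rw [if_neg hm] at h
      obtain ⟨k, hk, h1, h2, h3, h4⟩ := ih (count + a) h
      refine ⟨k + 1, by simpa using hk, by simpa using h1, by simpa [pvTs] using h2, h3, ?_⟩
      intro j hj
      match j with
      | 0 => simpa [pvTs] using hm
      | j + 1 => simpa [pvTs] using h4 j (by omega)

theorem pvHit_eq_none (tail : List Int) (count : Int) (xs : List Int)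
    (h : pvHit tail count xs = none) :
    ∀ j (hj : j < xs.length), (pvTs count xs)[j]'(by rw [pvTs_length]; exact hj) ∉ tail := by
  induction xs generalizing count with
  | nil => simp
  | cons a as ih =>
    simp only [pvHit] at h
    by_cases hm : (PySem.Int.floordiv (count + a) 2 - a) ∈ tail
    · rw [if_pos hm] at h; exact absurd h (by simp)
    · rw [if_neg hm] at h
      intro j hj
      match j with
      | 0 => simpa [pvTs] using hm
      | j + 1 => simpa [pvTs] using ih (count + a) h j (by simpa using hj)

-- stage 1 builds exactly the first-occurrence index of each partner value
theorem pvStage1B_get? (xs : List Int) (d : PySem.Dict Int Nat) (count : Int) (i : Nat) (y : Int) :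
    PySem.Dict.get? (pvStage1B d count i xs) y =
      (match PySem.Dict.get? d y with
       | some v => some v
       | none => (PySem.List.index? (pvTs count xs) y).map (· + i)) := by
  induction xs generalizing d count i with
  | nil =>
    simp only [pvStage1B, pvTs]
    cases PySem.Dict.get? d y <;> simp [PySem.List.index?]
  | cons x xs ih =>
    simp only [pvStage1B, pvTs, ih]
    by_cases hc : PySem.Dict.contains d (PySem.Int.floordiv (count + x) 2 - x)
    · rw [if_pos hc]
      by_cases hty : (PySem.Int.floordiv (count + x) 2 - x) = y
      · have : (PySem.Dict.get? d y).isSome := by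
          rw [← hty, ← PySem.Dict.contains_eq_isSome_get?]; exact hc
        obtain ⟨v, hv⟩ := Option.isSome_iff_exists.mp this
        simp [hv]
      · rw [PySem.List.index?_cons_of_ne _ hty]
        cases hdy : PySem.Dict.get? d y with
        | some v => simp
        | none =>
          simp only [Option.map_map]
          cases PySem.List.index? (pvTs (count + x) xs) y <;> simp <;> omega
    · rw [if_neg hc]
      have hdn : PySem.Dict.get? d (PySem.Int.floordiv (count + x) 2 - x) = none := by
        have hcontains := PySem.Dict.contains_eq_isSome_get? d (PySem.Int.floordiv (count + x) 2 - x)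
        cases hg : PySem.Dict.get? d (PySem.Int.floordiv (count + x) 2 - x) with
        | none => rfl
        | some v => rw [hg] at hcontains; simp at hcontains; exact absurd hcontains (by simpa using hc)
      by_cases hty : (PySem.Int.floordiv (count + x) 2 - x) = y
      · subst hty
        rw [PySem.Dict.get?_insert_self, hdn, PySem.List.index?_cons_self]
        simp
      · rw [PySem.Dict.get?_insert_of_ne _ _ (Ne.symm hty), PySem.List.index?_cons_of_ne _ hty]
        cases hdy : PySem.Dict.get? d y with
        | some v => simp
        | none =>
          simp only [Option.map_map]
          cases PySem.List.index? (pvTs (count + x) xs) y <;> simp <;> omega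

-- stage 2 computes a minimum of the looked-up indices together with a witnessing value
theorem pvStage2B_spec (d : PySem.Dict Int Nat) (n : Nat) (ys : List Int) :
    ∀ (best : Nat) (partner : Int),
      (pvStage2B d n best partner ys).1 ≤ best ∧
      (∀ y ∈ ys, (pvStage2B d n best partner ys).1 ≤ PySem.Dict.getD d y n) ∧
      (pvStage2B d n best partner ys = (best, partner) ∨
        ((pvStage2B d n best partner ys).2 ∈ ys ∧
          PySem.Dict.getD d (pvStage2B d n best partner ys).2 n = (pvStage2B d n best partner ys).1)) := by
  induction ys with
  | nil => intro best partner; simp [pvStage2B]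
  | cons y ys ih =>
    intro best partner
    simp only [pvStage2B]
    by_cases hk : PySem.Dict.getD d y n < best
    · rw [if_pos hk]
      obtain ⟨h1, h2, h3⟩ := ih (PySem.Dict.getD d y n) y
      refine ⟨by omega, ?_, ?_⟩
      · intro z hz
        rcases List.mem_cons.mp hz with rfl | hz
        · exact h1
        · exact h2 z hz
      · rcases h3 with h3 | ⟨h3, h4⟩
        · exact Or.inr ⟨by rw [h3]; simp, by rw [h3]⟩
        · exact Or.inr ⟨List.mem_cons_of_mem _ h3, h4⟩
    · rw [if_neg hk]
      obtain ⟨h1, h2, h3⟩ := ih best partner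
      refine ⟨h1, ?_, ?_⟩
      · intro z hz
        rcases List.mem_cons.mp hz with rfl | hz
        · omega
        · exact h2 z hz
      · rcases h3 with h3 | ⟨h3, h4⟩
        · exact Or.inl h3
        · exact Or.inr ⟨List.mem_cons_of_mem _ h3, h4⟩

-- the looked-up index of y is the first index k with ts[k] = y (or n when absent)
theorem pvG_eq (array : List Int) (y : Int) :
    PySem.Dict.getD (pvStage1B PySem.Dict.empty 0 0 array) y array.length =
      ((PySem.List.index? (pvTs 0 array) y).getD array.length) := by
  rw [PySem.Dict.getD_eq_get?_getD, pvStage1B_get? array PySem.Dict.empty 0 0 y]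
  simp

-- ===== VERDICT =====
theorem divide_array_into_sub_arrays_spec : Claim_equal_divide_array_into_sub_arrays := by
  intro array _
  unfold Spec_divide_array_into_sub_arrays divide_array_into_sub_arrays divide_array_into_sub_arrays_alt
  rw [PySem.List.slice_from_one]
  have hA := pvOuterA_eq array 0 0
  simp only [Nat.cast_zero, List.drop_zero, List.drop_one] at hA
  rw [hA]
  set d := pvStage1B PySem.Dict.empty 0 0 array with hd
  set bp := pvStage2B d array.length array.length 0 array.tail with hbp
  obtain ⟨h1, h2, h3⟩ := pvStage2B_spec d array.length array.tail array.length 0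
  rw [← hbp] at h1 h2 h3
  have hg : ∀ y : Int, PySem.Dict.getD d y array.length =
      (PySem.List.index? (pvTs 0 array) y).getD array.length := fun y => pvG_eq array y
  cases hHit : pvHit array.tail 0 array with
  | none =>
    have hnone : ∀ y ∈ array.tail, PySem.Dict.getD d y array.length = array.length := by
      intro y hy
      rw [hg y]
      cases hidx : PySem.List.index? (pvTs 0 array) y with
      | none => rfl
      | some m =>
        obtain ⟨hm, hts, _⟩ := PySem.List.getElem_of_index?_eq_some hidx
        have hmlen : m < array.length := by rw [pvTs_length] at hm; exact hm
        exact absurd (hts ▸ hy) (pvHit_eq_none array.tail 0 array hHit m hmlen)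
    have hbp1 : bp.1 = array.length := by
      rcases h3 with h3 | ⟨h3a, h3b⟩
      · rw [h3]
      · rw [← h3b]; exact hnone _ h3a
    rw [if_neg (by rw [← hbp]; omega)]
    simp
  | some p =>
    obtain ⟨x, t⟩ := p
    obtain ⟨k, hk, hx, ht, htail, hmin⟩ := pvHit_eq_some array.tail 0 array x t hHit
    have hmem : t ∈ pvTs 0 array := ht ▸ List.getElem_mem _
    obtain ⟨k', hk'eq⟩ := Option.isSome_iff_exists.mp
      ((PySem.List.index?_isSome_iff _ _).mpr hmem)
    obtain ⟨hk'lt, hts', hfirst⟩ := PySem.List.getElem_of_index?_eq_some hk'eq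
    have hk'len : k' < array.length := by rw [pvTs_length] at hk'lt; exact hk'lt
    have hkk' : k' = k := by
      by_contra hne
      rcases Nat.lt_or_ge k' k with hlt | hge
      · exact hmin k' hlt (hts' ▸ htail)
      · exact hfirst k (by omega) ht
    have hgdt : PySem.Dict.getD d t array.length = k := by
      rw [hg t, hk'eq, hkk']; rfl
    have hle : bp.1 ≤ k := by
      have := h2 t htail; omega
    have hlt : bp.1 < array.length := by omega
    rcases h3 with h3 | ⟨h3a, h3b⟩
    · rw [h3] at hlt; simp at hlt
    have hidx2 : (PySem.List.index? (pvTs 0 array) bp.2).getD array.length = bp.1 := by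
      rw [← hg bp.2, h3b]
    cases hidx : PySem.List.index? (pvTs 0 array) bp.2 with
    | none => rw [hidx] at hidx2; simp at hidx2; omega
    | some m =>
      rw [hidx] at hidx2; simp at hidx2
      obtain ⟨hmlt, htsm, hmfirst⟩ := PySem.List.getElem_of_index?_eq_some hidx
      have hmlen : m < array.length := by rw [pvTs_length] at hmlt; exact hmlt
      have hkm : k ≤ m := by
        by_contra hc
        exact hmin m (by omega) (htsm ▸ h3a)
      have hmk : m = k := by omega
      subst hmk
      have hbp1 : bp.1 = m := by omega
      have hbp2 : bp.2 = t := by rw [← ht]; exact htsm.symm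
      rw [if_pos hlt, hbp1]
      rw [PySem.List.pyGet?_natCast, List.getElem?_eq_getElem hk, hx]
      rw [← hbp, hbp2]
      simp
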